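-- pv_equiv track=rewrite | github.com/neu2270Ma/QRSDetection | backPre.py | getConsecutiveNum
-- ===== SOURCE A (Python) =====
-- def getConsecutiveNum(array):
--     count_zeros = []
--     count_ones = []
--     start_zeros = []
--     start_ones = []
--
--     # Initialize the current count, current value, and starting position.
--     current_count = 1
--     current_value = array[0]
--     start_index = 0
--
--     # Traverse the array, starting from the second element.
--     for i in range(1, len(array)):
--         if array[i] == current_value:
--             current_count += 1
--         else:
--             # Add the count and starting position to the respective lists based on the current value.
--             if current_value == 0:
--                 count_zeros.append(current_count)
--                 start_zeros.append(start_index)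
--             else:
--                 count_ones.append(current_count)
--                 start_ones.append(start_index)
--
--             # Reset the current count, current value, and starting position.
--             current_value = array[i]
--             current_count = 1
--             start_index = i
--
--     # Add the count and starting position of the last sequence to the respective lists
--     if current_value == 0:
--         count_zeros.append(current_count)
--         start_zeros.append(start_index)
--     else:
--         count_ones.append(current_count)
--         start_ones.append(start_index)
--
--     return count_zeros, count_ones, start_zeros, start_ones
-- ===== SOURCE B (Python) =====
-- def getConsecutiveNum(array):
--     # Phase 1: run-length encode the array into (value, length) runs.
--     if not array:
--         return [], [], [], []
--     runs = []
--     for x in array: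
--         if runs and runs[-1][0] == x:
--             runs[-1][1] += 1
--         else:
--             runs.append([x, 1])
--     # Phase 2: classify runs, tracking each run's start position.
--     count_zeros, count_ones, start_zeros, start_ones = [], [], [], []
--     start = 0
--     for v, c in runs:
--         if v == 0:
--             count_zeros.append(c)
--             start_zeros.append(start)
--         else:
--             count_ones.append(c)
--             start_ones.append(start)
--         start += c
--     return count_zeros, count_ones, start_zeros, start_ones
-- ===== Notes on version B (the rewrite author's own statement) =====
-- stated objective: alternative
-- what changed: Replaces A's single-pass state machine (current value/count/start carried through one loop with a duplicated flush block) by two phases: run-length-encode the array into (value, length) runs, then classify the runs while accumulating each run's start position.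
-- crash fix: On the empty list A raises IndexError when reading the first element; B returns four empty lists ([], [], [], []). — e.g. on getConsecutiveNum([]): A raises IndexError, B returns ([], [], [], [])
import Mathlib
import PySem

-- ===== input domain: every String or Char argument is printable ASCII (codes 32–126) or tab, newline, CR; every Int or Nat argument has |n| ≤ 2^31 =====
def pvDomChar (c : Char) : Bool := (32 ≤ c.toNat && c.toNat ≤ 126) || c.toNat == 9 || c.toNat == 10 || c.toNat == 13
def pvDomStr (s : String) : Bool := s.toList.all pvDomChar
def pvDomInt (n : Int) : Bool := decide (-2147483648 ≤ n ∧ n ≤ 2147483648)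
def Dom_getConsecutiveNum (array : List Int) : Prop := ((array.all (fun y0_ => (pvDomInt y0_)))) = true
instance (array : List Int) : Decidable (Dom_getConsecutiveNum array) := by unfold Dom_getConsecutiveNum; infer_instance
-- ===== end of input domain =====

-- B re-implements A as two phases (run-length encode, then classify runs with a running start); B returns four empty lists on [] where A raises IndexError. Equal return values proved on nonempty inputs.

-- ===== PORT A =====
-- state: (count_zeros, count_ones, start_zeros, start_ones, current_count, current_value, start_index)
def AState : Type := List Int × List Int × List Int × List Int × Int × Int × Int

-- loop body of A, for index i
def aStep (array : List Int) (acc : AState) (i : Int) : AState :=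
  match acc with
  | (cz, co, sz, so, cc, cv, si) =>
    if PySem.List.pyGetD array i 0 = cv then (cz, co, sz, so, cc + 1, cv, si)
    else if cv = 0 then (cz ++ [cc], co, sz ++ [si], so, 1, PySem.List.pyGetD array i 0, i)
    else (cz, co ++ [cc], sz, so ++ [si], 1, PySem.List.pyGetD array i 0, i)

-- the tail block after the loop
def aFinal (acc : AState) : List Int × List Int × List Int × List Int :=
  match acc with
  | (cz, co, sz, so, cc, cv, si) =>
    if cv = 0 then (cz ++ [cc], co, sz ++ [si], so)
    else (cz, co ++ [cc], sz, so ++ [si])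

def getConsecutiveNum (array : List Int) : List Int × List Int × List Int × List Int :=
  match array with
  | [] => ([], [], [], [])   -- Python raises IndexError reading the first element; excluded by Pre_
  | a :: _ =>
    aFinal ((PySem.List.pyRange 1 (PySem.List.len array) 1).foldl (aStep array)
      (([] : List Int), ([] : List Int), ([] : List Int), ([] : List Int), (1 : Int), a, (0 : Int)))

-- ===== PORT B =====
-- phase 1 accumulator keeps the runs NEWEST-FIRST (head = Python's runs[-1]); reversed at the end
def pushRun (rs : List (Int × Int)) (x : Int) : List (Int × Int) :=
  match rs with
  | (v, c) :: rest => if v = x then (v, c + 1) :: rest else (x, 1) :: (v, c) :: rest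
  | [] => [(x, 1)]

-- phase 2: classify each run, tracking the running start position
def classify : List (Int × Int) → Int → List Int × List Int × List Int × List Int →
    List Int × List Int × List Int × List Int
  | [], _, st => st
  | (v, c) :: rest, start, (cz, co, sz, so) =>
    classify rest (start + c)
      (if v = 0 then (cz ++ [c], co, sz ++ [start], so) else (cz, co ++ [c], sz, so ++ [start]))

def getConsecutiveNum_alt (array : List Int) : List Int × List Int × List Int × List Int :=
  if array = [] then ([], [], [], [])
  else classify ((array.foldl pushRun []).reverse) 0 ([], [], [], [])

-- ===== PRECONDITION & SPEC =====
-- Pre_ excludes [] only: there Python A raises IndexError reading the first element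
def Pre_getConsecutiveNum (array : List Int) : Prop := array ≠ []
instance (array : List Int) : Decidable (Pre_getConsecutiveNum array) := by unfold Pre_getConsecutiveNum; infer_instance
def pvWitness_getConsecutiveNum : List Int := [0, 1, 1, 0]

-- On the empty list A raises IndexError while B returns four empty lists.
def Raises_getConsecutiveNum (array : List Int) : Prop := array = []
instance (array : List Int) : Decidable (Raises_getConsecutiveNum array) := by unfold Raises_getConsecutiveNum; infer_instance
def pvRaiseWitness_getConsecutiveNum : List Int := []
def pvRaiseWitnessOut_getConsecutiveNum : List Int × List Int × List Int × List Int := ([], [], [], [])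

def Spec_getConsecutiveNum (array : List Int) (out : List Int × List Int × List Int × List Int) : Prop := out = getConsecutiveNum_alt array
instance (array : List Int) (out : List Int × List Int × List Int × List Int) : Decidable (Spec_getConsecutiveNum array out) := by unfold Spec_getConsecutiveNum; infer_instance

-- ===== CLAIM (what is proved, stated in full; the proofs are below) =====
def Claim_equal_getConsecutiveNum : Prop := ∀ (array : List Int), Dom_getConsecutiveNum array → Pre_getConsecutiveNum array → Spec_getConsecutiveNum array (getConsecutiveNum array)
def Claim_raises_getConsecutiveNum : Prop := (∀ (array : List Int), Dom_getConsecutiveNum array → Raises_getConsecutiveNum array → ¬ Pre_getConsecutiveNum array) ∧ (Dom_getConsecutiveNum (pvRaiseWitness_getConsecutiveNum) ∧ Raises_getConsecutiveNum (pvRaiseWitness_getConsecutiveNum) ∧ getConsecutiveNum_alt (pvRaiseWitness_getConsecutiveNum) = pvRaiseWitnessOut_getConsecutiveNum)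

-- ===== LEMMAS AND PROOFS =====

-- proof-only: A's loop rewritten as structural recursion over the suffix of the array
def stepList : List Int → Int → AState → AState
  | [], _, st => st
  | x :: xs, s, (cz, co, sz, so, cc, cv, si) =>
    if x = cv then stepList xs (s + 1) (cz, co, sz, so, cc + 1, cv, si)
    else if cv = 0 then stepList xs (s + 1) (cz ++ [cc], co, sz ++ [si], so, 1, x, s)
    else stepList xs (s + 1) (cz, co ++ [cc], sz, so ++ [si], 1, x, s)

-- proof-only: groupby-style runs of a suffix, given the current run (cv, cc)
def runsFrom (v c : Int) : List Int → List (Int × Int)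
  | [] => [(v, c)]
  | x :: xs => if x = v then runsFrom v (c + 1) xs else (v, c) :: runsFrom x 1 xs

theorem foldA_eq_stepList (array : List Int) :
    ∀ (xs : List Int) (s : Int) (st : AState),
      (∀ (k : Nat) (hk : k < xs.length), PySem.List.pyGetD array (s + k) 0 = xs[k]) →
      (PySem.List.pyRange s (s + xs.length) 1).foldl (aStep array) st = stepList xs s st := by
  intro xs
  induction xs with
  | nil =>
    intro s st _
    simp [PySem.List.pyRange_one_eq_nil (le_refl s), stepList]
  | cons x xs ih =>
    intro s st h
    have hlt : s < s + ((x :: xs).length : Int) := by simp only [List.length_cons]; push_cast; omega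
    rw [PySem.List.pyRange_one_cons hlt]
    have h0 : PySem.List.pyGetD array s 0 = x := by
      have := h 0 (by simp)
      simpa using this
    have harith : s + (((x :: xs).length : Nat) : Int) = (s + 1) + (xs.length : Int) := by
      simp only [List.length_cons]; push_cast; omega
    obtain ⟨cz, co, sz, so, cc, cv, si⟩ := st
    have hshift : ∀ (k : Nat) (hk : k < xs.length),
        PySem.List.pyGetD array ((s + 1) + k) 0 = xs[k] := by
      intro k hk
      have := h (k + 1) (by simp; omega)
      have e : s + ((k + 1 : Nat) : Int) = (s + 1) + (k : Int) := by push_cast; ring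
      rw [e] at this
      simpa using this
    simp only [List.foldl_cons, aStep, h0, harith]
    rw [ih (s + 1) _ hshift]
    conv_rhs => rw [stepList]
    split_ifs <;> rfl

theorem stepList_eq_classify :
    ∀ (xs : List Int) (cz co sz so : List Int) (cc cv si s : Int), s = si + cc →
      aFinal (stepList xs s (cz, co, sz, so, cc, cv, si)) =
        classify (runsFrom cv cc xs) si (cz, co, sz, so) := by
  intro xs
  induction xs with
  | nil =>
    intro cz co sz so cc cv si s hs
    by_cases hcv : cv = 0 <;> simp [stepList, runsFrom, classify, aFinal, hcv]
  | cons x xs ih =>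
    intro cz co sz so cc cv si s hs
    by_cases hx : x = cv
    · have e1 : stepList (x :: xs) s (cz, co, sz, so, cc, cv, si) =
          stepList xs (s + 1) (cz, co, sz, so, cc + 1, cv, si) := by
        simp [stepList, hx]
      have e2 : runsFrom cv cc (x :: xs) = runsFrom cv (cc + 1) xs := by
        simp [runsFrom, hx]
      rw [e1, e2, ih _ _ _ _ _ _ _ _ (by omega)]
    · have e2 : runsFrom cv cc (x :: xs) = (cv, cc) :: runsFrom x 1 xs := by
        simp [runsFrom, hx]
      by_cases hcv : cv = 0
      · subst hcv
        have e1 : stepList (x :: xs) s (cz, co, sz, so, cc, 0, si) =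
            stepList xs (s + 1) (cz ++ [cc], co, sz ++ [si], so, 1, x, s) := by
          simp [stepList, hx]
        rw [e1, e2, ih _ _ _ _ _ _ _ _ (by omega), classify, if_pos rfl, ← hs]
      · have e1 : stepList (x :: xs) s (cz, co, sz, so, cc, cv, si) =
            stepList xs (s + 1) (cz, co ++ [cc], sz, so ++ [si], 1, x, s) := by
          simp [stepList, hx, hcv]
        rw [e1, e2, ih _ _ _ _ _ _ _ _ (by omega), classify, if_neg hcv, ← hs]

theorem foldl_pushRun_runsFrom :
    ∀ (xs : List Int) (acc : List (Int × Int)) (v c : Int),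
      (xs.foldl pushRun ((v, c) :: acc)).reverse = acc.reverse ++ runsFrom v c xs := by
  intro xs
  induction xs with
  | nil => intro acc v c; simp [runsFrom]
  | cons x xs ih =>
    intro acc v c
    by_cases hv : v = x
    · simp only [List.foldl_cons, pushRun, runsFrom, hv, ite_true]
      exact ih acc x (c + 1)
    · have hx : ¬ x = v := fun h => hv h.symm
      simp only [List.foldl_cons, pushRun, if_neg hv, runsFrom, if_neg hx]
      rw [ih ((v, c) :: acc) x 1]
      simp

-- ===== VERDICT (by name: the statement is the Claim_ definition above) =====
theorem getConsecutiveNum_spec : Claim_equal_getConsecutiveNum := by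
  intro array _ hpre
  unfold Spec_getConsecutiveNum
  match array with
  | [] => exact absurd rfl hpre
  | a :: xs =>
    unfold getConsecutiveNum getConsecutiveNum_alt
    simp only [if_neg (by simp : ¬ (a :: xs = []))]
    have hlen : PySem.List.len (a :: xs) = 1 + (xs.length : Int) := by
      simp [PySem.List.len]; omega
    rw [hlen,
      foldA_eq_stepList (a :: xs) xs 1 _ (by
        intro k hk
        have e : (1 : Int) + (k : Nat) = ((k + 1 : Nat) : Int) := by push_cast; ring
        rw [e, PySem.List.pyGetD_natCast]
        simp [List.getD, hk]),
      stepList_eq_classify xs [] [] [] [] 1 a 0 1 (by omega)]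
    have : ((a :: xs).foldl pushRun []).reverse = runsFrom a 1 xs := by
      have := foldl_pushRun_runsFrom xs [] a 1
      simpa using this
    rw [this]

@[simp] theorem getConsecutiveNum_raises : Claim_raises_getConsecutiveNum := by
  unfold Claim_raises_getConsecutiveNum
  exact ⟨fun array _ hr => by simp [Pre_getConsecutiveNum, Raises_getConsecutiveNum] at *; exact hr, by decide⟩
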